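-- pv_equiv track=rewrite | github.com/praveen556/Python_October2021 | src/Subsets_With_Duplicate_Characters.py | get_distinct_subsets
-- ===== SOURCE A (Python) =====
-- def get_distinct_subsets(str):
--     str = sorted(str)
--     result = []
--
--     def helper(slate, i):
--         result.append(slate)
--         if i == len(str):
--             return
--
--         unique = {}
--         for k in range(i, len(str)):
--             if str[k] not in unique:
--                 unique[str[k]] = 1
--                 helper(slate + str[k], k + 1)
--
--     helper("", 0)
--     return result
-- ===== SOURCE B (Python) =====
-- def get_distinct_subsets(str):
--     str = sorted(str)
--     result = []
--     stack = [("", 0)]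
--     while stack:
--         slate, i = stack.pop()
--         result.append(slate)
--         children = []
--         seen = set()
--         for k in range(i, len(str)):
--             c = str[k]
--             if c not in seen:
--                 seen.add(c)
--                 children.append((slate + c, k + 1))
--         stack.extend(reversed(children))
--     return result
-- ===== Notes on version B (the rewrite author's own statement) =====
-- stated objective: alternative
-- what changed: Replaces A's recursive backtracking helper (closure appending to a shared result) with an explicit LIFO stack loop that pops (slate, i), emits slate, and pushes the level's distinct children in reverse, producing the identical preorder.
import Mathlib
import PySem

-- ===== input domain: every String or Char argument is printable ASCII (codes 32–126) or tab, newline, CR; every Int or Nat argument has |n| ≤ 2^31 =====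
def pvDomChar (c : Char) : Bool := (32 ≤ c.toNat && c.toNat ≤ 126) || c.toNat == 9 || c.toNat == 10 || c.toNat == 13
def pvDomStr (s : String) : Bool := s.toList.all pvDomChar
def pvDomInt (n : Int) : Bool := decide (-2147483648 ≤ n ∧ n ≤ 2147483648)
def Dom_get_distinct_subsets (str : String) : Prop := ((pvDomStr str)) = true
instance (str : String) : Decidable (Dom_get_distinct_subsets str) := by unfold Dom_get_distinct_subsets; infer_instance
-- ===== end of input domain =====

-- B replaces A's recursive helper by an explicit LIFO stack loop (same preorder output); objective: alternative decomposition, same cost.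

-- ===== PORT A =====
-- A: sorted chars, recursive helper appending `slate` then recursing over distinct chars (dict `unique` per level).
mutual
def pvAHelper (cs : List Char) (slate : String) (i : Nat) : List String :=
  slate :: (if i = cs.length then [] else pvALoop cs slate i PySem.Dict.empty)
termination_by (cs.length - i, 1)

def pvALoop (cs : List Char) (slate : String) (k : Nat) (unique : PySem.Dict Char Int) : List String :=
  if h : k < cs.length then
    let c := cs[k]
    if unique.contains c then
      pvALoop cs slate (k + 1) unique
    else
      pvAHelper cs (slate.push c) (k + 1) ++ pvALoop cs slate (k + 1) (unique.insert c 1)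
  else []
termination_by (cs.length - k, 0)
end

def get_distinct_subsets (str : String) : List String :=
  let cs := PySem.List.sorted str.toList (fun c => c) false
  pvAHelper cs "" 0

-- ===== PORT B =====
-- B: children of a node — scan k from i, skipping characters already seen at this level.
def pvBScan (cs : List Char) (slate : String) (k : Nat) (seen : PySem.Set Char) : List (String × Nat) :=
  if h : k < cs.length then
    let c := cs[k]
    if PySem.Set.contains seen c then
      pvBScan cs slate (k + 1) seen
    else
      (slate.push c, k + 1) :: pvBScan cs slate (k + 1) (PySem.Set.add seen c)
  else []
termination_by cs.length - k

-- B: while stack: pop, emit, push children (reversed in Python, so in order on top here).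
-- fuel only makes the loop structurally terminating; 3^|cs| is proved sufficient below.
def pvBLoop (cs : List Char) (fuel : Nat) (stack : List (String × Nat)) : List String :=
  match fuel, stack with
  | _, [] => []
  | 0, _ :: _ => []
  | fuel + 1, (slate, i) :: rest =>
      slate :: pvBLoop cs fuel (pvBScan cs slate i PySem.Set.empty ++ rest)

def get_distinct_subsets_alt (str : String) : List String :=
  let cs := PySem.List.sorted str.toList (fun c => c) false
  pvBLoop cs (3 ^ cs.length) [("", 0)]

-- ===== PRECONDITION & SPEC =====
def Spec_get_distinct_subsets (str : String) (out : List String) : Prop := out = get_distinct_subsets_alt str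
instance (str : String) (out : List String) : Decidable (Spec_get_distinct_subsets str out) := by unfold Spec_get_distinct_subsets; infer_instance

-- ===== CLAIM (what is proved, stated in full; the proofs are below) =====
def Claim_equal_get_distinct_subsets : Prop := ∀ (str : String), Dom_get_distinct_subsets str → Spec_get_distinct_subsets str (get_distinct_subsets str)

-- ===== LEMMAS AND PROOFS =====

def pvMeasure (cs : List Char) (stack : List (String × Nat)) : Nat :=
  (stack.map (fun p => 3 ^ (cs.length - p.2))).sum

theorem pvALoop_eq_flatMap (cs : List Char) (slate : String) (k : Nat)
    (unique : PySem.Dict Char Int) (seen : PySem.Set Char)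
    (hmem : ∀ c, unique.contains c = PySem.Set.contains seen c) :
    pvALoop cs slate k unique =
      (pvBScan cs slate k seen).flatMap (fun p => pvAHelper cs p.1 p.2) := by
  induction hk : cs.length - k generalizing k unique seen with
  | zero =>
      rw [pvALoop, pvBScan]
      have : ¬ k < cs.length := by omega
      simp [this]
  | succ n ih =>
      have hlt : k < cs.length := by omega
      rw [pvALoop, pvBScan]
      simp only [hlt, dif_pos, hmem]
      by_cases hc : PySem.Set.contains seen cs[k] = true
      · simp only [hc, if_pos]
        exact ih (k + 1) unique seen hmem (by omega)
      · simp only [Bool.not_eq_true] at hc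
        have hns : ¬ seen.contains cs[k] = true := by rw [hc]; simp
        rw [if_neg hns, if_neg hns, List.flatMap_cons]
        congr 1
        refine ih (k + 1) _ _ ?_ (by omega)
        intro c
        apply Bool.eq_iff_iff.mpr
        rw [PySem.Dict.contains_insert, PySem.Set.contains_iff, PySem.Set.mem_add]
        simp only [Bool.or_eq_true, beq_iff_eq, hmem, PySem.Set.contains_iff]
        tauto

theorem pvAHelper_eq (cs : List Char) (slate : String) (i : Nat) :
    pvAHelper cs slate i =
      slate :: (pvBScan cs slate i PySem.Set.empty).flatMap (fun p => pvAHelper cs p.1 p.2) := by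
  rw [pvAHelper]
  congr 1
  by_cases hi : i = cs.length
  · rw [if_pos hi, pvBScan]
    simp [hi]
  · rw [if_neg hi]
    exact pvALoop_eq_flatMap cs slate i PySem.Dict.empty PySem.Set.empty (by intro c; rfl)

theorem pvMeasure_scan_lt (cs : List Char) (slate : String) (k : Nat) (seen : PySem.Set Char) :
    pvMeasure cs (pvBScan cs slate k seen) < 3 ^ (cs.length - k) := by
  induction hk : cs.length - k generalizing k seen with
  | zero =>
      rw [pvBScan]
      have : ¬ k < cs.length := by omega
      simp [this, pvMeasure]
  | succ n ih =>
      have hlt : k < cs.length := by omega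
      have hstep : cs.length - (k + 1) = n := by omega
      have hpow : 3 ^ (cs.length - k) = 3 * 3 ^ n := by
        rw [show cs.length - k = n + 1 by omega, pow_succ, Nat.mul_comm]
      rw [pvBScan]
      simp only [hlt, dif_pos]
      by_cases hc : PySem.Set.contains seen cs[k] = true
      · simp only [hc, if_pos]
        have h1 := ih (k + 1) seen hstep
        have h2 : 3 ^ n ≤ 3 ^ (n + 1) := Nat.pow_le_pow_right (by norm_num) (by omega)
        omega
      · simp only [hc, if_neg, Bool.false_eq_true, not_false_iff]
        have h1 := ih (k + 1) (PySem.Set.add seen cs[k]) hstep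
        simp only [pvMeasure, List.map_cons, List.sum_cons] at *
        rw [hstep]
        have h2 : 3 ^ (n + 1) = 3 * 3 ^ n := by ring
        omega

theorem pvBLoop_eq_flatMap (cs : List Char) (fuel : Nat) (stack : List (String × Nat))
    (hfuel : pvMeasure cs stack ≤ fuel) :
    pvBLoop cs fuel stack = stack.flatMap (fun p => pvAHelper cs p.1 p.2) := by
  induction fuel generalizing stack with
  | zero =>
      match stack with
      | [] => rfl
      | (slate, i) :: rest =>
          exfalso
          have : 0 < 3 ^ (cs.length - i) := Nat.pow_pos (by norm_num)
          simp only [pvMeasure, List.map_cons, List.sum_cons] at hfuel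
          omega
  | succ fuel ih =>
      match stack with
      | [] => rfl
      | (slate, i) :: rest =>
          have hscan := pvMeasure_scan_lt cs slate i PySem.Set.empty
          have hm : pvMeasure cs (pvBScan cs slate i PySem.Set.empty ++ rest) ≤ fuel := by
            simp only [pvMeasure, List.map_append, List.sum_append] at *
            simp only [List.map_cons, List.sum_cons] at hfuel
            omega
          rw [pvBLoop, ih _ hm, List.flatMap_append, List.flatMap_cons, pvAHelper_eq]
          rfl

-- ===== VERDICT (by name: the statement is the Claim_ definition above) =====
theorem get_distinct_subsets_spec : Claim_equal_get_distinct_subsets := by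
  intro str _
  unfold Spec_get_distinct_subsets get_distinct_subsets get_distinct_subsets_alt
  rw [pvBLoop_eq_flatMap]
  · simp
  · simp only [pvMeasure, List.map_cons, List.map_nil, List.sum_cons, List.sum_nil, Nat.add_zero,
      Nat.sub_zero]
    exact Nat.le_refl _
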